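-- pv_equiv track=rewrite | github.com/Eng-AlaaHosny/MedGuard-AI-Powered-Medication-Safety-Assistant | backend/app/data/drugbank_processor.py | map_severity
-- ===== SOURCE A (Python) =====
-- def map_severity(description: str) -> int:
--     """
--     Map interaction description to severity score.
--     0 = safe, 1 = caution, 2 = warning, 3 = danger
--     Blueprint Section 3.1
--     """
--     if not description:
--         return 0
--     desc_lower = description.lower()
--     if any(word in desc_lower for word in [
--         'major', 'contraindicated', 'severe', 'serious', 'fatal',
--         'dangerous', 'life-threatening', 'toxic', 'toxicity'
--     ]):
--         return 3
--     elif any(word in desc_lower for word in [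
--         'moderate', 'significant', 'monitor', 'increase', 'decrease',
--         'risk', 'bleeding', 'anticoagulant', 'inhibit', 'enhance'
--     ]):
--         return 2
--     elif any(word in desc_lower for word in [
--         'minor', 'mild', 'slight', 'may', 'possible', 'potential'
--     ]):
--         return 1
--     return 0
-- ===== SOURCE B (Python) =====
-- _SEVERITY_TABLE = (
--     [(w, 3) for w in [
--         'major', 'contraindicated', 'severe', 'serious', 'fatal',
--         'dangerous', 'life-threatening', 'toxic', 'toxicity'
--     ]]
--     + [(w, 2) for w in [
--         'moderate', 'significant', 'monitor', 'increase', 'decrease',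
--         'risk', 'bleeding', 'anticoagulant', 'inhibit', 'enhance'
--     ]]
--     + [(w, 1) for w in [
--         'minor', 'mild', 'slight', 'may', 'possible', 'potential'
--     ]]
-- )
--
--
-- def map_severity(description: str) -> int:
--     desc_lower = description.lower()
--     scores = [score for word, score in _SEVERITY_TABLE if word in desc_lower]
--     return max(scores, default=0)
-- ===== Notes on version B (the rewrite author's own statement) =====
-- stated objective: alternative
-- what changed: Replaces the three cascaded any()/early-return checks by one keyword->score table, collecting the scores of all matching keywords and returning their maximum with default 0.
import Mathlib
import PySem

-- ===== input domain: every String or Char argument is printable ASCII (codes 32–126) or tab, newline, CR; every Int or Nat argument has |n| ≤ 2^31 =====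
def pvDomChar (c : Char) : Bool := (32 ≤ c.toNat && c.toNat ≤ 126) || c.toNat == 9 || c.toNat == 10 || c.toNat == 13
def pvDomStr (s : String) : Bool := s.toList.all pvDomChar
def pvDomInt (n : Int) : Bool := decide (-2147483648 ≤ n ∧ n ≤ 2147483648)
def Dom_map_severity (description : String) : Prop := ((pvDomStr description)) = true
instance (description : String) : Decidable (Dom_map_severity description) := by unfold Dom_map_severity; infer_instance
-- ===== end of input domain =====

-- B replaces A's three cascaded any()/early-return checks by one keyword→score table and a
-- single collect-scores-then-max pass (objective: alternative decomposition, same cost).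

-- ===== PORT A =====
def map_severity (description : String) : Int :=
  if description = "" then 0
  else
    let desc_lower := PySem.Str.lower description
    if (["major", "contraindicated", "severe", "serious", "fatal",
         "dangerous", "life-threatening", "toxic", "toxicity"].any
          (fun word => PySem.Str.isIn word desc_lower)) then 3
    else if (["moderate", "significant", "monitor", "increase", "decrease",
              "risk", "bleeding", "anticoagulant", "inhibit", "enhance"].any
               (fun word => PySem.Str.isIn word desc_lower)) then 2
    else if (["minor", "mild", "slight", "may", "possible", "potential"].any
               (fun word => PySem.Str.isIn word desc_lower)) then 1
    else 0

-- ===== PORT B =====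
def dangerWords : List String :=
  ["major", "contraindicated", "severe", "serious", "fatal",
   "dangerous", "life-threatening", "toxic", "toxicity"]

def warningWords : List String :=
  ["moderate", "significant", "monitor", "increase", "decrease",
   "risk", "bleeding", "anticoagulant", "inhibit", "enhance"]

def cautionWords : List String :=
  ["minor", "mild", "slight", "may", "possible", "potential"]

def severityTable : List (String × Int) :=
  dangerWords.map (fun w => (w, 3))
  ++ warningWords.map (fun w => (w, 2))
  ++ cautionWords.map (fun w => (w, 1))

def map_severity_alt (description : String) : Int :=
  let desc_lower := PySem.Str.lower description
  let scores :=
    (severityTable.filter (fun p => PySem.Str.isIn p.1 desc_lower)).map (fun p => p.2)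
  (PySem.List.max? scores (fun x => x)).getD 0

-- ===== PRECONDITION & SPEC =====
def Spec_map_severity (description : String) (out : Int) : Prop := out = map_severity_alt description
instance (description : String) (out : Int) : Decidable (Spec_map_severity description out) := by unfold Spec_map_severity; infer_instance

-- ===== CLAIM (what is proved, stated in full; the proofs are below) =====
def Claim_equal_map_severity : Prop := ∀ (description : String), Dom_map_severity description → Spec_map_severity description (map_severity description)

-- ===== LEMMAS AND PROOFS =====

-- max over the scores of the matched table rows equals c when some matched row scores c
-- and every matched row scores at most c
lemma max_filter_eq (l : List (String × Int)) (q : String × Int → Bool) (c : Int)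
    (hmem : ∃ p, p ∈ l ∧ q p = true ∧ p.2 = c)
    (hub : ∀ p ∈ l, q p = true → p.2 ≤ c) :
    ((PySem.List.max? ((l.filter q).map (fun p => p.2)) (fun x => x)).getD 0) = c := by
  obtain ⟨p, hp, hq, hpc⟩ := hmem
  have hcmem : c ∈ (l.filter q).map (fun p => p.2) :=
    List.mem_map.mpr ⟨p, List.mem_filter.mpr ⟨hp, hq⟩, hpc⟩
  cases hm : PySem.List.max? ((l.filter q).map (fun p => p.2)) (fun x => x) with
  | none =>
      rw [(PySem.List.max?_eq_none_iff _ _).mp hm] at hcmem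
      simp at hcmem
  | some m =>
      have h1 : c ≤ m := PySem.List.max?_id_le hm c hcmem
      obtain ⟨p', hp', hp'2⟩ := List.mem_map.mp (PySem.List.max?_mem hm)
      have h2 := hub p' (List.mem_filter.mp hp').1 (List.mem_filter.mp hp').2
      simp only [Option.getD_some]
      omega

lemma max_filter_none (l : List (String × Int)) (q : String × Int → Bool)
    (h : ∀ p ∈ l, q p = false) :
    ((PySem.List.max? ((l.filter q).map (fun p => p.2)) (fun x => x)).getD 0) = 0 := by
  have : l.filter q = [] := List.filter_eq_nil_iff.mpr (by intro p hp; simp [h p hp])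
  simp [this, PySem.List.max?]

-- every table row scores 3, 2 or 1 according to which word list its key comes from
lemma table_rows : ∀ p ∈ severityTable,
    (p.2 = (3 : Int) ∧ p.1 ∈ dangerWords) ∨ (p.2 = 2 ∧ p.1 ∈ warningWords) ∨
    (p.2 = 1 ∧ p.1 ∈ cautionWords) := by decide

theorem map_severity_spec : Claim_equal_map_severity := by
  intro d _
  unfold Spec_map_severity map_severity map_severity_alt
  by_cases hd : d = ""
  · subst hd; decide
  · simp only [if_neg hd]
    set desc := PySem.Str.lower d with hdesc
    set q : String × Int → Bool := fun p => PySem.Str.isIn p.1 desc with hq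
    have e3 : ((["major", "contraindicated", "severe", "serious", "fatal",
         "dangerous", "life-threatening", "toxic", "toxicity"] : List String).any
          (fun word => PySem.Str.isIn word desc))
        = dangerWords.any (fun w => PySem.Str.isIn w desc) := rfl
    have e2 : ((["moderate", "significant", "monitor", "increase", "decrease",
              "risk", "bleeding", "anticoagulant", "inhibit", "enhance"] : List String).any
          (fun word => PySem.Str.isIn word desc))
        = warningWords.any (fun w => PySem.Str.isIn w desc) := rfl
    have e1 : ((["minor", "mild", "slight", "may", "possible", "potential"] : List String).any
          (fun word => PySem.Str.isIn word desc))
        = cautionWords.any (fun w => PySem.Str.isIn w desc) := rfl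
    rw [e3, e2, e1]
    by_cases h3 : dangerWords.any (fun w => PySem.Str.isIn w desc) = true
    · simp only [h3, if_true]
      obtain ⟨w, hw, hwin⟩ := List.any_eq_true.mp h3
      refine (max_filter_eq _ q 3 ⟨(w, 3), ?_, hwin, rfl⟩ ?_).symm
      · exact List.mem_append_left _ (List.mem_append_left _ (List.mem_map.mpr ⟨w, hw, rfl⟩))
      · intro p hp _
        rcases table_rows p hp with ⟨h, _⟩ | ⟨h, _⟩ | ⟨h, _⟩ <;> omega
    · have h3f : (dangerWords.any (fun w => PySem.Str.isIn w desc)) = false := by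
        simpa using h3
      simp only [h3f, Bool.false_eq_true, if_false]
      have h3' : ∀ w ∈ dangerWords, PySem.Str.isIn w desc = false := by
        simpa using h3
      by_cases h2 : warningWords.any (fun w => PySem.Str.isIn w desc) = true
      · simp only [h2, if_true]
        obtain ⟨w, hw, hwin⟩ := List.any_eq_true.mp h2
        refine (max_filter_eq _ q 2 ⟨(w, 2), ?_, hwin, rfl⟩ ?_).symm
        · exact List.mem_append_left _ (List.mem_append_right _ (List.mem_map.mpr ⟨w, hw, rfl⟩))
        · intro p hp hqp
          rcases table_rows p hp with ⟨hc, hm⟩ | ⟨hc, _⟩ | ⟨hc, _⟩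
          · exact absurd hqp (by simp only [hq]; rw [h3' p.1 hm]; simp)
          · omega
          · omega
      · have h2f : (warningWords.any (fun w => PySem.Str.isIn w desc)) = false := by
          simpa using h2
        simp only [h2f, Bool.false_eq_true, if_false]
        have h2' : ∀ w ∈ warningWords, PySem.Str.isIn w desc = false := by
          simpa using h2
        by_cases h1 : cautionWords.any (fun w => PySem.Str.isIn w desc) = true
        · simp only [h1, if_true]
          obtain ⟨w, hw, hwin⟩ := List.any_eq_true.mp h1
          refine (max_filter_eq _ q 1 ⟨(w, 1), ?_, hwin, rfl⟩ ?_).symm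
          · exact List.mem_append_right _ (List.mem_map.mpr ⟨w, hw, rfl⟩)
          · intro p hp hqp
            rcases table_rows p hp with ⟨hc, hm⟩ | ⟨hc, hm⟩ | ⟨hc, _⟩
            · exact absurd hqp (by simp only [hq]; rw [h3' p.1 hm]; simp)
            · exact absurd hqp (by simp only [hq]; rw [h2' p.1 hm]; simp)
            · omega
        · have h1f : (cautionWords.any (fun w => PySem.Str.isIn w desc)) = false := by
            simpa using h1
          simp only [h1f, Bool.false_eq_true, if_false]
          have h1' : ∀ w ∈ cautionWords, PySem.Str.isIn w desc = false := by
            simpa using h1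
          refine (max_filter_none _ q ?_).symm
          intro p hp
          rcases table_rows p hp with ⟨_, hm⟩ | ⟨_, hm⟩ | ⟨_, hm⟩
          · simp only [hq]; exact h3' p.1 hm
          · simp only [hq]; exact h2' p.1 hm
          · simp only [hq]; exact h1' p.1 hm
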